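-- pv_equiv track=rewrite | github.com/Leapense/problems | 4475번： Let the Wookiee Win!/Let the Wookiee Win!.py | find_safe_move
-- ===== SOURCE A (Python) =====
-- def find_safe_move(board):
--     def is_winning_move(board, player, row, col):
--         board[row][col] = player
--         win = check_win(board, player)
--         board[row][col] = '*'
--         return win
--
--     def check_win(board, player):
--         for i in range(5):
--             for j in range(2):
--                 if all(board[i][j + k] == player for k in range(4)) or all(board[j + k][i] == player for k in range(4)):
--                     return True
--         for i in range(2):
--             for j in range(2):
--                 if all(board[i + k][j + k] == player for k in range(4)) or all(board[i + 3 - k][j + k] == player for k in range(4)):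
--                     return True
--         return False
--
--     for i in range(5):
--         for j in range(5):
--             if board[i][j] == '*':
--                 if not is_winning_move(board, 'O', i, j) and not is_winning_move(board, 'X', i, j):
--                     return i * 5 + j + 1
-- ===== SOURCE B (Python) =====
-- def find_safe_move(board):
--     lines = ([[(i, j + k) for k in range(4)] for i in range(5) for j in range(2)]
--            + [[(j + k, i) for k in range(4)] for i in range(5) for j in range(2)]
--            + [[(i + k, j + k) for k in range(4)] for i in range(2) for j in range(2)]
--            + [[(i + 3 - k, j + k) for k in range(4)] for i in range(2) for j in range(2)])
--     # One pass over the lines: collect every cell that would complete a line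
--     # for either player; a fully completed line means every empty cell "wins".
--     unsafe = set()
--     for p in ('O', 'X'):
--         for line in lines:
--             gaps = [rc for rc in line if board[rc[0]][rc[1]] != p]
--             if len(gaps) == 0:
--                 return None   # board already has a winning line: no safe move exists
--             if len(gaps) == 1:
--                 unsafe.add(gaps[0])
--     for i in range(5):
--         for j in range(5):
--             if board[i][j] == '*' and (i, j) not in unsafe:
--                 return i * 5 + j + 1
--     return None
-- ===== Notes on version B (the rewrite author's own statement) =====
-- stated objective: alternative
-- what changed: B inverts the computation: instead of testing each empty cell by placing a symbol and rescanning all windows, it makes a single pass over the 28 winning lines, building a set of 'unsafe' cells (the unique gap of any 3-filled line, with an early exit on a completed line), then returns the first empty cell not in that set.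
import Mathlib
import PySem

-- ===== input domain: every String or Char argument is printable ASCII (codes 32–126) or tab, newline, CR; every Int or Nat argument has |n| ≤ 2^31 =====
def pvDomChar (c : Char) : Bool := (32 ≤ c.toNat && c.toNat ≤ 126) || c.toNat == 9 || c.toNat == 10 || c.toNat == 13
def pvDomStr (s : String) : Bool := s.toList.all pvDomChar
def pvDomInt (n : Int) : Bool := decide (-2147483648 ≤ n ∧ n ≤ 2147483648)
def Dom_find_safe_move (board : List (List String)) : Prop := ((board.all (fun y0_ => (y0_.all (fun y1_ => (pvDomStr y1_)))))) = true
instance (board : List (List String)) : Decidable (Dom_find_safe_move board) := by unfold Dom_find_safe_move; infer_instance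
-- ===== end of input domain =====

-- B replaces A's per-cell mutate-and-rescan win test by ONE pass over the 28 winning
-- lines that builds a set of unsafe cells (the unique gap of any 3-filled line, with an
-- early exit on an already-completed line), then scans for the first empty cell not in
-- the set (objective: alternative decomposition).
-- A mutates `board` in place but restores it before returning; B never mutates.

-- ===== PORT A =====
-- board[r][c] read: exact under Pre_ (indices used are always in range there)
def pvCellA (board : List (List String)) (r c : Int) : String :=
  PySem.List.pyGetD (PySem.List.pyGetD board r []) c ""

-- board[r][c] = v (Python in-place assignment, as a functional update)
def pvSetCell (board : List (List String)) (r c : Int) (v : String) : List (List String) :=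
  PySem.List.pySetD board r (PySem.List.pySetD (PySem.List.pyGetD board r []) c v)

-- check_win: the two sequential for-blocks with `return True` are the `or` of two `any`s
def pvCheckWin (b : List (List String)) (p : String) : Bool :=
  ((PySem.List.pyRange 0 5 1).any fun i => (PySem.List.pyRange 0 2 1).any fun j =>
     ((PySem.List.pyRange 0 4 1).all fun k => pvCellA b i (j+k) == p) ||
     ((PySem.List.pyRange 0 4 1).all fun k => pvCellA b (j+k) i == p))
  || ((PySem.List.pyRange 0 2 1).any fun i => (PySem.List.pyRange 0 2 1).any fun j =>
     ((PySem.List.pyRange 0 4 1).all fun k => pvCellA b (i+k) (j+k) == p) ||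
     ((PySem.List.pyRange 0 4 1).all fun k => pvCellA b (i+3-k) (j+k) == p))

-- is_winning_move: place, test, (restoring '*' is a no-op on the immutable copy)
def pvIsWinningMove (board : List (List String)) (p : String) (row col : Int) : Bool :=
  pvCheckWin (pvSetCell board row col p) p

def find_safe_move (board : List (List String)) : Option Int :=
  (PySem.List.pyRange 0 5 1).findSome? fun i =>
    (PySem.List.pyRange 0 5 1).findSome? fun j =>
      if pvCellA board i j == "*" then
        (if !pvIsWinningMove board "O" i j && !pvIsWinningMove board "X" i j then
          some (i*5+j+1) else none)
      else none

-- ===== PORT B =====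
def pvCellB (board : List (List String)) (r c : Int) : String :=
  PySem.List.pyGetD (PySem.List.pyGetD board r []) c ""

-- the 28 winning 4-cell lines, as Source B's four list comprehensions
def pvLinesB : List (List (Int × Int)) :=
  ((PySem.List.pyRange 0 5 1).flatMap fun i => (PySem.List.pyRange 0 2 1).map fun j =>
      (PySem.List.pyRange 0 4 1).map fun k => (i, j+k))
  ++ ((PySem.List.pyRange 0 5 1).flatMap fun i => (PySem.List.pyRange 0 2 1).map fun j =>
      (PySem.List.pyRange 0 4 1).map fun k => (j+k, i))
  ++ ((PySem.List.pyRange 0 2 1).flatMap fun i => (PySem.List.pyRange 0 2 1).map fun j =>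
      (PySem.List.pyRange 0 4 1).map fun k => (i+k, j+k))
  ++ ((PySem.List.pyRange 0 2 1).flatMap fun i => (PySem.List.pyRange 0 2 1).map fun j =>
      (PySem.List.pyRange 0 4 1).map fun k => (i+3-k, j+k))

-- gaps = [rc for rc in line if board[rc[0]][rc[1]] != p]
def pvGapsB (board : List (List String)) (p : String) (line : List (Int × Int)) : List (Int × Int) :=
  line.filter fun rc => !(pvCellB board rc.1 rc.2 == p)

-- one line of the aggregation pass; `none` state = the early `return None` was taken
def pvUnsafeStep (board : List (List String)) (p : String)
    (st : Option (PySem.Set (Int × Int))) (line : List (Int × Int)) :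
    Option (PySem.Set (Int × Int)) :=
  st.bind fun s =>
    match pvGapsB board p line with
    | [] => none
    | [g] => some (PySem.Set.add s g)
    | _ => some s

def pvUnsafe (board : List (List String)) : Option (PySem.Set (Int × Int)) :=
  (["O", "X"] : List String).foldl
    (fun st p => pvLinesB.foldl (pvUnsafeStep board p) st)
    (some PySem.Set.empty)

def find_safe_move_alt (board : List (List String)) : Option Int :=
  match pvUnsafe board with
  | none => none
  | some uns =>
    (PySem.List.pyRange 0 5 1).findSome? fun i =>
      (PySem.List.pyRange 0 5 1).findSome? fun j =>
        if pvCellB board i j == "*" && !(PySem.Set.contains uns (i, j)) then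
          some (i*5+j+1) else none

-- ===== PRECONDITION & SPEC =====
-- Pre_ excludes boards with fewer than 5 rows or with a row shorter than 5 among the
-- first five: there A's indexing normally raises IndexError, and any value it still
-- returns is an accident of `all`'s short-circuit evaluation order, not a specified result.
def Pre_find_safe_move (board : List (List String)) : Prop :=
  5 ≤ board.length ∧ ∀ r ∈ board.take 5, 5 ≤ r.length
instance (board : List (List String)) : Decidable (Pre_find_safe_move board) := by
  unfold Pre_find_safe_move; infer_instance

def pvWitness_find_safe_move : List (List String) :=
  [["*","*","*","*","*"],["*","*","*","*","*"],["*","*","*","*","*"],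
   ["*","*","*","*","*"],["*","*","*","*","*"]]

def Spec_find_safe_move (board : List (List String)) (out : Option Int) : Prop := out = find_safe_move_alt board
instance (board : List (List String)) (out : Option Int) : Decidable (Spec_find_safe_move board out) := by unfold Spec_find_safe_move; infer_instance

-- ===== CLAIM (what is proved, stated in full; the proofs are below) =====
def Claim_equal_find_safe_move : Prop := ∀ (board : List (List String)), Dom_find_safe_move board → Pre_find_safe_move board → Spec_find_safe_move board (find_safe_move board)

-- ===== LEMMAS AND PROOFS =====

theorem pvFindSome_congr {α β : Type} {f g : α → Option β} {l : List α}
    (h : ∀ x ∈ l, f x = g x) : l.findSome? f = l.findSome? g := by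
  induction l with
  | nil => rfl
  | cons a l ih => simp_all [List.findSome?_cons]

-- A's win test for the candidate cell, phrased over the line list (proof-only helper)
def pvWouldWin (board : List (List String)) (p : String) (i j : Int) : Bool :=
  pvLinesB.any fun line => line.all fun rc =>
    pvCellA board rc.1 rc.2 == p || (rc.1 == i && rc.2 == j)

-- writing into the copy = reading the original with the candidate cell treated as set
theorem pvCellSet (board : List (List String)) (hlen : 5 ≤ board.length)
    (hrow : ∀ r ∈ board.take 5, 5 ≤ r.length) (i j : Int)
    (hi0 : 0 ≤ i) (hi : i < 5) (hj0 : 0 ≤ j) (hj : j < 5) (p : String) (r c : Int)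
    (hr0 : 0 ≤ r) (hc0 : 0 ≤ c) :
    pvCellA (pvSetCell board i j p) r c = if r = i ∧ c = j then p else pvCellA board r c := by
  obtain ⟨a, rfl⟩ : ∃ n : Nat, i = (n : Int) := ⟨i.toNat, by omega⟩
  obtain ⟨b, rfl⟩ : ∃ n : Nat, j = (n : Int) := ⟨j.toNat, by omega⟩
  obtain ⟨m, rfl⟩ : ∃ n : Nat, r = (n : Int) := ⟨r.toNat, by omega⟩
  obtain ⟨q, rfl⟩ : ∃ n : Nat, c = (n : Int) := ⟨c.toNat, by omega⟩
  have ha : a < board.length := by omega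
  have hb : b < (PySem.List.pyGetD board (a : Int) []).length := by
    have hmem : board[a] ∈ board.take 5 := by
      apply List.mem_take_iff_getElem.mpr
      exact ⟨a, by omega, by simp⟩
    have := hrow _ hmem
    rw [PySem.List.pyGetD_natCast, List.getD_eq_getElem _ _ ha]
    omega
  unfold pvCellA pvSetCell
  rw [PySem.List.pyGetD_pySetD_natCast _ _ _ _ _ ha]
  by_cases hma : m = a
  · subst hma
    rw [if_pos rfl, PySem.List.pyGetD_pySetD_natCast _ _ _ _ _ hb]
    by_cases hqb : q = b
    · subst hqb; simp
    · have h1 : ¬((m : Int) = (m : Int) ∧ (q : Int) = (b : Int)) := by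
        rintro ⟨-, h⟩; exact hqb (by exact_mod_cast h)
      rw [if_neg (by simpa using hqb), if_neg h1]
  · have h1 : ¬((m : Int) = (a : Int) ∧ (q : Int) = (b : Int)) := by
      rintro ⟨h, -⟩; exact hma (by exact_mod_cast h)
    rw [if_neg (by simpa using hma), if_neg h1]

theorem pvBeqIte (x p : String) (r c i j : Int) :
    ((if r = i ∧ c = j then p else x) == p) = ((x == p) || (r == i && c == j)) := by
  by_cases h1 : r = i <;> by_cases h2 : c = j <;> simp [h1, h2]

-- A's win test on the mutated board = the line test on the original board
theorem pvWinEq (board : List (List String)) (hlen : 5 ≤ board.length)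
    (hrow : ∀ r ∈ board.take 5, 5 ≤ r.length) (p : String) (i j : Int)
    (hi0 : 0 ≤ i) (hi : i < 5) (hj0 : 0 ≤ j) (hj : j < 5) :
    pvIsWinningMove board p i j = pvWouldWin board p i j := by
  have hcell : ∀ r c : Int, 0 ≤ r → 0 ≤ c →
      (pvCellA (pvSetCell board i j p) r c == p)
        = ((pvCellA board r c == p) || (r == i && c == j)) := by
    intro r c hr hc
    rw [pvCellSet board hlen hrow i j hi0 hi hj0 hj p r c hr hc, pvBeqIte]
  have h5 : PySem.List.pyRange 0 5 1 = [0,1,2,3,4] := by decide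
  have h2 : PySem.List.pyRange 0 2 1 = [0,1] := by decide
  have h4 : PySem.List.pyRange 0 4 1 = [0,1,2,3] := by decide
  unfold pvIsWinningMove pvCheckWin pvWouldWin pvLinesB
  simp only [h5, h2, h4, List.any_cons, List.any_nil, List.all_cons, List.all_nil,
    List.map_cons, List.map_nil, List.flatMap_cons, List.flatMap_nil,
    List.nil_append, List.cons_append, List.append_nil,
    Int.reduceAdd, Int.reduceSub]
  simp only [Bool.or_false, Bool.and_true]
  simp [hcell]
  simp only [pvCellA]
  ac_rfl

-- a Nodup list all of whose elements are x is [] or [x]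
theorem pvNodupAllEq {α : Type} {l : List α} {x : α} (hnd : l.Nodup)
    (h : ∀ y ∈ l, y = x) : l = [] ∨ l = [x] := by
  match l with
  | [] => exact Or.inl rfl
  | [a] => exact Or.inr (by rw [h a (by simp)])
  | a :: b :: t =>
    exfalso
    have ha := h a (by simp); have hb := h b (by simp)
    subst ha; rw [hb] at hnd; simp at hnd

theorem pvLinesNodup : ∀ line ∈ pvLinesB, line.Nodup := by decide

-- line test for an empty candidate = its gap list is [] or [(i,j)]
theorem pvLineGaps (board : List (List String)) (p : String) (i j : Int)
    (_hstar : (pvCellB board i j == p) = false) (line : List (Int × Int))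
    (hnd : line.Nodup) :
    (line.all fun rc => pvCellA board rc.1 rc.2 == p || (rc.1 == i && rc.2 == j))
      = (pvGapsB board p line == [] || pvGapsB board p line == [(i, j)]) := by
  by_cases hall : ∀ rc ∈ line, (pvCellA board rc.1 rc.2 == p || (rc.1 == i && rc.2 == j)) = true
  · have h1 : (line.all fun rc => pvCellA board rc.1 rc.2 == p || (rc.1 == i && rc.2 == j)) = true := by
      simp only [List.all_eq_true]; exact hall
    have hgaps : ∀ y ∈ pvGapsB board p line, y = (i, j) := by
      intro y hy
      unfold pvGapsB at hy
      rw [List.mem_filter] at hy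
      obtain ⟨hyl, hyp⟩ := hy
      have := hall y hyl
      simp only [Bool.not_eq_true'] at hyp
      rw [show pvCellB = pvCellA from rfl] at hyp
      rw [hyp] at this
      simp only [Bool.false_or, Bool.and_eq_true, beq_iff_eq] at this
      exact Prod.ext this.1 this.2
    have hnd' : (pvGapsB board p line).Nodup := List.Nodup.filter _ hnd
    rcases pvNodupAllEq hnd' hgaps with h | h <;> simp [h1, h]
  · push_neg at hall
    obtain ⟨rc, hrcl, hrc⟩ := hall
    have h1 : (line.all fun rc => pvCellA board rc.1 rc.2 == p || (rc.1 == i && rc.2 == j)) = false := by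
      simp only [List.all_eq_false]
      exact ⟨rc, hrcl, hrc⟩
    rw [h1]
    simp at hrc
    obtain ⟨hne, hnij⟩ := hrc
    have hmem : rc ∈ pvGapsB board p line := by
      unfold pvGapsB
      rw [List.mem_filter]
      exact ⟨hrcl, by simp [show pvCellB = pvCellA from rfl]; simpa using hne⟩
    have hrcne : rc ≠ (i, j) := by
      intro h; subst h; simp at hnij
    symm
    simp only [Bool.or_eq_false_iff, beq_eq_false_iff_ne, ne_eq]
    constructor
    · intro h; rw [h] at hmem; simp at hmem
    · intro h; rw [h] at hmem; simp at hmem; exact hrcne hmem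

-- characterization of the inner fold over the lines
theorem pvFoldNone (board : List (List String)) (p : String) (L : List (List (Int × Int))) :
    L.foldl (pvUnsafeStep board p) none = none := by
  induction L with
  | nil => rfl
  | cons l L ih => simpa [pvUnsafeStep] using ih

theorem pvFoldChar (board : List (List String)) (p : String) (L : List (List (Int × Int)))
    (s : PySem.Set (Int × Int)) :
    ((L.foldl (pvUnsafeStep board p) (some s) = none ↔ ∃ l ∈ L, pvGapsB board p l = [])
    ∧ ∀ s', L.foldl (pvUnsafeStep board p) (some s) = some s' →
        ∀ x, (PySem.Set.contains s' x = true ↔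
          PySem.Set.contains s x = true ∨ ∃ l ∈ L, pvGapsB board p l = [x])) := by
  induction L generalizing s with
  | nil => exact ⟨by simp, by intro s' h x; simp at h; subst h; simp⟩
  | cons l L ih =>
    simp only [List.foldl_cons]
    rcases hg : pvGapsB board p l with _ | ⟨g, _ | ⟨g2, t⟩⟩
    · -- gaps = [] : early return
      have hstep : pvUnsafeStep board p (some s) l = none := by
        simp [pvUnsafeStep, hg]
      rw [hstep, pvFoldNone]
      refine ⟨Iff.intro (fun _ => ⟨l, List.mem_cons_self, hg⟩) (fun _ => rfl),
              fun s' h => absurd h (by simp)⟩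
    · -- gaps = [g]
      have hstep : pvUnsafeStep board p (some s) l = some (PySem.Set.add s g) := by
        simp [pvUnsafeStep, hg]
      rw [hstep]
      obtain ⟨ihn, ihs⟩ := ih (PySem.Set.add s g)
      constructor
      · rw [ihn]
        constructor
        · rintro ⟨l', hl', h⟩; exact ⟨l', by simp [hl'], h⟩
        · rintro ⟨l', hl', h⟩
          rcases List.mem_cons.mp hl' with rfl | hl'
          · rw [hg] at h; simp at h
          · exact ⟨l', hl', h⟩
      · intro s' h x
        rw [ihs s' h x]
        have hadd : PySem.Set.contains (PySem.Set.add s g) x = true ↔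
            PySem.Set.contains s x = true ∨ x = g := by
          rw [PySem.Set.contains_iff, PySem.Set.mem_add, PySem.Set.contains_iff]
        rw [hadd]
        constructor
        · rintro ((h | rfl) | ⟨l', hl', h⟩)
          · exact Or.inl h
          · exact Or.inr ⟨l, by simp, hg⟩
          · exact Or.inr ⟨l', by simp [hl'], h⟩
        · rintro (h | ⟨l', hl', h⟩)
          · exact Or.inl (Or.inl h)
          · rcases List.mem_cons.mp hl' with rfl | hl'
            · rw [hg] at h; simp at h; exact Or.inl (Or.inr h.symm)
            · exact Or.inr ⟨l', hl', h⟩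
    · -- gaps has ≥ 2 elements
      have hstep : pvUnsafeStep board p (some s) l = some s := by
        simp [pvUnsafeStep, hg]
      rw [hstep]
      obtain ⟨ihn, ihs⟩ := ih s
      constructor
      · rw [ihn]
        constructor
        · rintro ⟨l', hl', h⟩; exact ⟨l', by simp [hl'], h⟩
        · rintro ⟨l', hl', h⟩
          rcases List.mem_cons.mp hl' with rfl | hl'
          · rw [hg] at h; simp at h
          · exact ⟨l', hl', h⟩
      · intro s' h x
        rw [ihs s' h x]
        constructor
        · rintro (h | ⟨l', hl', h⟩)
          · exact Or.inl h
          · exact Or.inr ⟨l', by simp [hl'], h⟩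
        · rintro (h | ⟨l', hl', h⟩)
          · exact Or.inl h
          · rcases List.mem_cons.mp hl' with rfl | hl'
            · rw [hg] at h; simp at h
            · exact Or.inr ⟨l', hl', h⟩

-- ===== VERDICT (by name: the statement is the Claim_ definition above) =====
theorem find_safe_move_spec : Claim_equal_find_safe_move := by
  intro board hDom hPre
  obtain ⟨hlen, hrow⟩ := hPre
  unfold Spec_find_safe_move find_safe_move find_safe_move_alt pvUnsafe
  simp only [List.foldl_cons, List.foldl_nil]
  -- inner fold for "O"
  rcases hO : pvLinesB.foldl (pvUnsafeStep board "O") (some PySem.Set.empty) with _ | sO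
  · -- a completed "O" line exists: both sides return none
    rw [pvFoldNone]
    obtain ⟨l, hl, hgl⟩ := ((pvFoldChar board "O" pvLinesB PySem.Set.empty).1).mp hO
    have hwin : ∀ i j : Int, 0 ≤ i → i < 5 → 0 ≤ j → j < 5 →
        pvWouldWin board "O" i j = true := by
      intro i j hi0 hi hj0 hj
      unfold pvWouldWin
      rw [List.any_eq_true]
      refine ⟨l, hl, ?_⟩
      rw [List.all_eq_true]
      intro rc hrc
      have : rc ∉ pvGapsB board "O" l := by rw [hgl]; simp
      unfold pvGapsB at this
      simp only [List.mem_filter, Bool.not_eq_true', not_and] at this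
      have := this hrc
      simp only [Bool.not_eq_false] at this
      simp [show pvCellB = pvCellA from rfl] at this
      simp [this]
    rw [List.findSome?_eq_none_iff]
    intro i hi
    rw [List.findSome?_eq_none_iff]
    intro j hj
    rw [PySem.List.mem_pyRange_one] at hi hj
    by_cases hc : (pvCellA board i j == "*") = true
    · rw [if_pos hc]
      rw [pvWinEq board hlen hrow "O" i j hi.1 hi.2 hj.1 hj.2,
          hwin i j hi.1 hi.2 hj.1 hj.2]
      simp
    · rw [if_neg (by simpa using hc)]
  · rcases hX : pvLinesB.foldl (pvUnsafeStep board "X") (some sO) with _ | sX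
    · -- a completed "X" line exists: both sides return none
      obtain ⟨l, hl, hgl⟩ := ((pvFoldChar board "X" pvLinesB sO).1).mp hX
      have hwin : ∀ i j : Int, 0 ≤ i → i < 5 → 0 ≤ j → j < 5 →
          pvWouldWin board "X" i j = true := by
        intro i j hi0 hi hj0 hj
        unfold pvWouldWin
        rw [List.any_eq_true]
        refine ⟨l, hl, ?_⟩
        rw [List.all_eq_true]
        intro rc hrc
        have : rc ∉ pvGapsB board "X" l := by rw [hgl]; simp
        unfold pvGapsB at this
        simp only [List.mem_filter, Bool.not_eq_true', not_and] at this
        have := this hrc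
        simp only [Bool.not_eq_false] at this
        simp [show pvCellB = pvCellA from rfl] at this
        simp [this]
      rw [List.findSome?_eq_none_iff]
      intro i hi
      rw [List.findSome?_eq_none_iff]
      intro j hj
      rw [PySem.List.mem_pyRange_one] at hi hj
      by_cases hc : (pvCellA board i j == "*") = true
      · rw [if_pos hc]
        rw [pvWinEq board hlen hrow "X" i j hi.1 hi.2 hj.1 hj.2,
            hwin i j hi.1 hi.2 hj.1 hj.2]
        simp
      · rw [if_neg (by simpa using hc)]
    · -- no completed line: the unsafe set characterizes both win tests
      have hnoO : ¬ ∃ l ∈ pvLinesB, pvGapsB board "O" l = [] := by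
        intro h
        have := ((pvFoldChar board "O" pvLinesB PySem.Set.empty).1).mpr h
        rw [hO] at this; simp at this
      have hnoX : ¬ ∃ l ∈ pvLinesB, pvGapsB board "X" l = [] := by
        intro h
        have := ((pvFoldChar board "X" pvLinesB sO).1).mpr h
        rw [hX] at this; simp at this
      have hmemO : ∀ x, PySem.Set.contains sO x = true ↔
          ∃ l ∈ pvLinesB, pvGapsB board "O" l = [x] := by
        intro x
        rw [((pvFoldChar board "O" pvLinesB PySem.Set.empty).2) sO hO x]
        simp [PySem.Set.empty]
      have hmemX : ∀ x, PySem.Set.contains sX x = true ↔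
          PySem.Set.contains sO x = true ∨ ∃ l ∈ pvLinesB, pvGapsB board "X" l = [x] :=
        ((pvFoldChar board "X" pvLinesB sO).2) sX hX
      refine pvFindSome_congr (fun i hi => pvFindSome_congr (fun j hj => ?_))
      rw [PySem.List.mem_pyRange_one] at hi hj
      by_cases hc : (pvCellB board i j == "*") = true
      · rw [if_pos (by exact hc)]
        -- would-win for p = membership of (i,j) among p's single-gap lines
        have hwchar : ∀ p : String, (pvCellB board i j == p) = false →
            (pvWouldWin board p i j = true ↔
              (∃ l ∈ pvLinesB, pvGapsB board p l = []) ∨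
              ∃ l ∈ pvLinesB, pvGapsB board p l = [(i, j)]) := by
          intro p hne
          unfold pvWouldWin
          rw [List.any_eq_true]
          constructor
          · rintro ⟨l, hl, hall⟩
            rw [pvLineGaps board p i j hne l (pvLinesNodup l hl)] at hall
            simp only [Bool.or_eq_true, beq_iff_eq] at hall
            rcases hall with h | h
            · exact Or.inl ⟨l, hl, h⟩
            · exact Or.inr ⟨l, hl, h⟩
          · rintro (⟨l, hl, h⟩ | ⟨l, hl, h⟩) <;>
              refine ⟨l, hl, ?_⟩ <;>
              rw [pvLineGaps board p i j ‹_› l (pvLinesNodup l hl)] <;>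
              simp [h]
        have hstarO : (pvCellB board i j == "O") = false := by
          simp only [beq_iff_eq] at hc ⊢; simp [hc]
        have hstarX : (pvCellB board i j == "X") = false := by
          simp only [beq_iff_eq] at hc ⊢; simp [hc]
        have hWO : pvIsWinningMove board "O" i j = true ↔
            PySem.Set.contains sO (i, j) = true := by
          rw [pvWinEq board hlen hrow "O" i j hi.1 hi.2 hj.1 hj.2,
              hwchar "O" hstarO, hmemO (i, j)]
          constructor
          · rintro (h | h)
            · exact absurd h hnoO
            · exact h
          · exact Or.inr
        have hWX : pvIsWinningMove board "X" i j = true ↔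
            ∃ l ∈ pvLinesB, pvGapsB board "X" l = [(i, j)] := by
          rw [pvWinEq board hlen hrow "X" i j hi.1 hi.2 hj.1 hj.2,
              hwchar "X" hstarX]
          constructor
          · rintro (h | h)
            · exact absurd h hnoX
            · exact h
          · exact Or.inr
        have hor : (pvIsWinningMove board "O" i j || pvIsWinningMove board "X" i j)
            = PySem.Set.contains sX (i, j) := by
          rw [Bool.eq_iff_iff]
          rw [Bool.or_eq_true, hWO, hWX, hmemX (i, j)]
        have hcond : (!pvIsWinningMove board "O" i j && !pvIsWinningMove board "X" i j)
            = !PySem.Set.contains sX (i, j) := by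
          rw [← Bool.not_or, hor]
        rw [hcond, hc, Bool.true_and]
      · rw [if_neg (by simpa using hc)]
        simp at hc
        simp [hc]
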